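-- pv_equiv track=rewrite | github.com/bobsync/ENIB | decider/pipeline_debug.py | assign_time_markers
-- ===== SOURCE A (Python) =====
-- from typing import Any, Dict, List, Optional, Tuple
--
-- def attach_punctuation(tokens: List[str]) -> List[str]:
--     merged: List[str] = []
--     for tok in tokens:
--         if tok in {'.', ',', '!', '?'} and merged: merged[-1] += tok
--         else: merged.append(tok)
--     return merged
--
-- def assign_time_markers(parsed: List[Tuple[str, bool]]) -> Tuple[List[str], int]:
--     markers: List[str] = []
--     idx = 0
--     for word, is_marked in parsed:
--         if is_marked:
--             markers.append(f'<mark name="tm{idx}"/> {word}')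
--             idx += 1
--         else:
--             markers.append(word)
--     markers.append(f'<mark name="tm{idx}"/>')
--     return attach_punctuation(markers), idx
-- ===== SOURCE B (Python) =====
-- def assign_time_markers(parsed):
--     out = []
--     idx = 0
--     for word, is_marked in parsed:
--         if is_marked:
--             s = f'<mark name="tm{idx}"/> {word}'
--             idx += 1
--         else:
--             s = word
--         if s in ('.', ',', '!', '?') and out:
--             out[-1] += s
--         else:
--             out.append(s)
--     out.append(f'<mark name="tm{idx}"/>')
--     return out, idx
-- ===== Notes on version B (the rewrite author's own statement) =====
-- stated objective: simpler
-- what changed: Fused A's two passes (build marker list, then separate attach_punctuation pass) into one loop that builds the final merged list directly, appending the closing marker without a second pass.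
import Mathlib
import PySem

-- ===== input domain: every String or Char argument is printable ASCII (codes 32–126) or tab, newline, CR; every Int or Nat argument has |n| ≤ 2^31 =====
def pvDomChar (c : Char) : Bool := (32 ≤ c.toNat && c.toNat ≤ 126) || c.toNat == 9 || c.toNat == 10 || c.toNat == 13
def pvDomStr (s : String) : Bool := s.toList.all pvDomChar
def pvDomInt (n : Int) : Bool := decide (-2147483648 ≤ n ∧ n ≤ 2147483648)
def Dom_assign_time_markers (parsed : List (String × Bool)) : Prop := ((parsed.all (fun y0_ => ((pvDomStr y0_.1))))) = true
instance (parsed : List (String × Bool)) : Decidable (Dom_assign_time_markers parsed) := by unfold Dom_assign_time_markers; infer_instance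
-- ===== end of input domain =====

-- B fuses A's two passes (marker construction, then a separate attach_punctuation pass) into one loop; simpler decomposition, same O(n) cost.

-- ===== PORT A =====
-- `merged[-1] += tok` / `merged.append(tok)` for one token, exactly A's loop body
def pvAttachStep (merged : List String) (tok : String) : List String :=
  if (tok = "." ∨ tok = "," ∨ tok = "!" ∨ tok = "?") ∧ merged ≠ [] then
    merged.dropLast ++ [(merged.getLast?.getD "") ++ tok]
  else merged ++ [tok]

def attach_punctuation (tokens : List String) : List String :=
  tokens.foldl pvAttachStep []

def assign_time_markers (parsed : List (String × Bool)) : List String × Int :=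
  let st := parsed.foldl (fun (s : List String × Int) wi =>
      if wi.2 then
        (s.1 ++ ["<mark name=\"tm" ++ PySem.Int.toStr s.2 ++ "\"/> " ++ wi.1], s.2 + 1)
      else
        (s.1 ++ [wi.1], s.2)) ([], 0)
  (attach_punctuation (st.1 ++ ["<mark name=\"tm" ++ PySem.Int.toStr st.2 ++ "\"/>"]), st.2)

-- ===== PORT B =====
-- one fused loop: compute the (possibly marked) token string, then merge it into `out` inline
def pvFusedStep (s : List String × Int) (wi : String × Bool) : List String × Int :=
  let tok := if wi.2 then "<mark name=\"tm" ++ PySem.Int.toStr s.2 ++ "\"/> " ++ wi.1 else wi.1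
  let idx := if wi.2 then s.2 + 1 else s.2
  if (tok = "." ∨ tok = "," ∨ tok = "!" ∨ tok = "?") ∧ s.1 ≠ [] then
    (s.1.dropLast ++ [(s.1.getLast?.getD "") ++ tok], idx)
  else (s.1 ++ [tok], idx)

def assign_time_markers_alt (parsed : List (String × Bool)) : List String × Int :=
  let st := parsed.foldl pvFusedStep ([], 0)
  (st.1 ++ ["<mark name=\"tm" ++ PySem.Int.toStr st.2 ++ "\"/>"], st.2)

-- ===== PRECONDITION & SPEC =====
def Spec_assign_time_markers (parsed : List (String × Bool)) (out : List String × Int) : Prop := out = assign_time_markers_alt parsed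
instance (parsed : List (String × Bool)) (out : List String × Int) : Decidable (Spec_assign_time_markers parsed out) := by unfold Spec_assign_time_markers; infer_instance

-- ===== CLAIM (what is proved, stated in full; the proofs are below) =====
def Claim_equal_assign_time_markers : Prop := ∀ (parsed : List (String × Bool)), Dom_assign_time_markers parsed → Spec_assign_time_markers parsed (assign_time_markers parsed)

-- ===== LEMMAS AND PROOFS =====

-- a string of length ≥ 2 (every marker string) is never a punctuation token
theorem len_not_punct (x : String) (hx : 2 ≤ x.length) :
    ¬ (x = "." ∨ x = "," ∨ x = "!" ∨ x = "?") := by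
  rintro (h | h | h | h) <;> subst h <;> revert hx <;> decide

theorem marker_len (s t : String) :
    2 ≤ ("<mark name=\"tm" ++ s ++ t).length := by
  have h14 : "<mark name=\"tm".length = 14 := by decide
  simp only [String.length_append, h14]
  omega

theorem attachStep_long (m : List String) (x : String) (hx : 2 ≤ x.length) :
    pvAttachStep m x = m ++ [x] := by
  unfold pvAttachStep
  rw [if_neg (fun hc => len_not_punct x hx hc.1)]

-- A's first loop starting from (ms, i) just appends to ms
theorem foldA_factor (parsed : List (String × Bool)) (ms : List String) (i : Int) :
    parsed.foldl (fun (s : List String × Int) wi =>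
      if wi.2 then
        (s.1 ++ ["<mark name=\"tm" ++ PySem.Int.toStr s.2 ++ "\"/> " ++ wi.1], s.2 + 1)
      else
        (s.1 ++ [wi.1], s.2)) (ms, i)
    = (ms ++ (parsed.foldl (fun (s : List String × Int) wi =>
      if wi.2 then
        (s.1 ++ ["<mark name=\"tm" ++ PySem.Int.toStr s.2 ++ "\"/> " ++ wi.1], s.2 + 1)
      else
        (s.1 ++ [wi.1], s.2)) ([], i)).1,
       (parsed.foldl (fun (s : List String × Int) wi =>
      if wi.2 then
        (s.1 ++ ["<mark name=\"tm" ++ PySem.Int.toStr s.2 ++ "\"/> " ++ wi.1], s.2 + 1)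
      else
        (s.1 ++ [wi.1], s.2)) ([], i)).2) := by
  induction parsed generalizing ms i with
  | nil => simp
  | cons wi rest ih =>
    obtain ⟨w, b⟩ := wi
    cases b
    · simp only [List.foldl_cons, Bool.false_eq_true, if_false, List.nil_append]
      rw [ih (ms ++ [w]) i, ih [w] i]
      simp
    · simp only [List.foldl_cons, if_true, List.nil_append]
      rw [ih (ms ++ ["<mark name=\"tm" ++ PySem.Int.toStr i ++ "\"/> " ++ w]) (i + 1),
          ih ["<mark name=\"tm" ++ PySem.Int.toStr i ++ "\"/> " ++ w] (i + 1)]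
      simp

-- main invariant: B's fused fold from (out, i) equals folding pvAttachStep over A's marker list
theorem fused_eq (parsed : List (String × Bool)) (out : List String) (i : Int) :
    parsed.foldl pvFusedStep (out, i)
    = (((parsed.foldl (fun (s : List String × Int) wi =>
          if wi.2 then
            (s.1 ++ ["<mark name=\"tm" ++ PySem.Int.toStr s.2 ++ "\"/> " ++ wi.1], s.2 + 1)
          else
            (s.1 ++ [wi.1], s.2)) ([], i)).1).foldl pvAttachStep out,
       (parsed.foldl (fun (s : List String × Int) wi =>
          if wi.2 then
            (s.1 ++ ["<mark name=\"tm" ++ PySem.Int.toStr s.2 ++ "\"/> " ++ wi.1], s.2 + 1)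
          else
            (s.1 ++ [wi.1], s.2)) ([], i)).2) := by
  induction parsed generalizing out i with
  | nil => simp
  | cons wi rest ih =>
    obtain ⟨w, b⟩ := wi
    cases b
    · have hstep : pvFusedStep (out, i) (w, false) = (pvAttachStep out w, i) := by
        unfold pvFusedStep pvAttachStep
        simp only [Bool.false_eq_true, if_false]
        split_ifs <;> rfl
      simp only [List.foldl_cons, Bool.false_eq_true, if_false, List.nil_append]
      rw [hstep, ih, foldA_factor rest [w] i]
      simp
    · have hlen : 2 ≤ ("<mark name=\"tm" ++ PySem.Int.toStr i ++ "\"/> " ++ w).length := by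
        have h14 : "<mark name=\"tm".length = 14 := by decide
        simp only [String.length_append, h14]
        omega
      have hstep : pvFusedStep (out, i) (w, true)
          = (out ++ ["<mark name=\"tm" ++ PySem.Int.toStr i ++ "\"/> " ++ w], i + 1) := by
        unfold pvFusedStep
        simp only [if_true]
        rw [if_neg (fun hc => len_not_punct _ hlen hc.1)]
      simp only [List.foldl_cons, if_true, List.nil_append]
      rw [hstep, ih,
        foldA_factor rest ["<mark name=\"tm" ++ PySem.Int.toStr i ++ "\"/> " ++ w] (i + 1)]
      simp [attachStep_long _ _ hlen]

-- ===== VERDICT (by name: the statement is the Claim_ definition above) =====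
theorem assign_time_markers_spec : Claim_equal_assign_time_markers := by
  intro parsed _
  unfold Spec_assign_time_markers assign_time_markers assign_time_markers_alt attach_punctuation
  simp only
  rw [List.foldl_append, fused_eq parsed [] 0]
  simp [attachStep_long _ _ (marker_len _ "\"/>")]
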